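-- pv_equiv track=rewrite | github.com/yunhuijang/HGGT | data/data_utils.py | get_child_index
-- ===== SOURCE A (Python) =====
-- def get_child_index(k):
--     indices = []
--     c = 0
--     for i in range(k+1):
--         for j in range(1,i+1):
--             c=c+1
--             if j != i:
--                 indices.append(c)
--     return indices
-- ===== SOURCE B (Python) =====
-- def get_child_index(k):
--     total = 0
--     triangles = set()
--     for i in range(k + 1):
--         total += i
--         if i > 0:
--             triangles.add(total)
--     return [c for c in range(1, total + 1) if c not in triangles]
-- ===== Notes on version B (the rewrite author's own statement) =====
-- stated objective: simpler
-- what changed: Replaces the nested enumerate-and-skip loops with one accumulation pass that records the triangular numbers to skip, followed by a single flat filtered pass over range(1, total+1).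
import Mathlib
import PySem

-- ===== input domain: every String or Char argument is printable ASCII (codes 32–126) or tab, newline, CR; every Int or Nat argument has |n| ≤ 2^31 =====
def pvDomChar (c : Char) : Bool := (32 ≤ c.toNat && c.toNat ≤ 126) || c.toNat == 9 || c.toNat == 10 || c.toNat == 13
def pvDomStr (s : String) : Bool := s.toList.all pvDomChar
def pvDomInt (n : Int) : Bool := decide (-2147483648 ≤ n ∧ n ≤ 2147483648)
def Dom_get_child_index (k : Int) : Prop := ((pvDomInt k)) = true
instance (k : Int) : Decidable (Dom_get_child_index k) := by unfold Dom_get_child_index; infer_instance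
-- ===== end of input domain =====

-- B replaces A's nested enumerate-and-skip loops by one accumulation pass that records the
-- triangular numbers to skip, then one flat filtered pass (objective: simpler).

-- ===== PORT A =====
def get_child_index (k : Int) : List Int :=
  ((PySem.List.pyRange 0 (k + 1) 1).foldl
    (fun (st : List Int × Int) i =>
      (PySem.List.pyRange 1 (i + 1) 1).foldl
        (fun (st2 : List Int × Int) j =>
          let c := st2.2 + 1
          if j ≠ i then (st2.1 ++ [c], c) else (st2.1, c)) st)
    (([] : List Int), (0 : Int))).1

-- ===== PORT B =====
def get_child_index_alt (k : Int) : List Int :=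
  let st := (PySem.List.pyRange 0 (k + 1) 1).foldl
    (fun (st : Int × PySem.Set Int) i =>
      let total := st.1 + i
      (total, if i > 0 then PySem.Set.add st.2 total else st.2))
    ((0 : Int), (PySem.Set.empty : PySem.Set Int))
  (PySem.List.pyRange 1 (st.1 + 1) 1).filter (fun c => !(PySem.Set.contains st.2 c))

-- ===== PRECONDITION & SPEC =====
def Spec_get_child_index (k : Int) (out : List Int) : Prop := out = get_child_index_alt k
instance (k : Int) (out : List Int) : Decidable (Spec_get_child_index k out) := by unfold Spec_get_child_index; infer_instance

-- ===== CLAIM (what is proved, stated in full; the proofs are below) =====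
def Claim_equal_get_child_index : Prop := ∀ (k : Int), Dom_get_child_index k → Spec_get_child_index k (get_child_index k)

-- ===== LEMMAS AND PROOFS =====

-- running triangular sum: tri m = 0 + 1 + … + (m-1)
def pvTri : Nat → Int
  | 0 => 0
  | m + 1 => pvTri m + m

-- A's accumulated list after rows 0 .. m-1
def pvLA : Nat → List Int
  | 0 => []
  | m + 1 => pvLA m ++ PySem.List.pyRange (pvTri m + 1) (pvTri m + m) 1

-- B's set after rows 0 .. m-1
def pvSB : Nat → List Int
  | 0 => []
  | m + 1 => if m = 0 then pvSB m else pvSB m ++ [pvTri (m + 1)]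

theorem pvTri_nonneg (m : Nat) : 0 ≤ pvTri m := by
  induction m with
  | zero => simp [pvTri]
  | succ m ih => simp only [pvTri]; positivity

theorem pvSB_le (m : Nat) : ∀ x ∈ pvSB m, 1 ≤ x ∧ x ≤ pvTri m := by
  induction m with
  | zero => simp [pvSB]
  | succ m ih =>
    intro x hx
    simp only [pvSB] at hx
    split at hx
    · rename_i h; subst h
      simp [pvSB] at hx
    · rename_i h
      rcases List.mem_append.mp hx with h1 | h1
      · have hb := ih x h1
        have hm : (0 : Int) ≤ (m : Int) := by positivity
        simp only [pvTri]
        omega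
      · simp only [List.mem_singleton] at h1; subst h1
        have h2 := pvTri_nonneg m
        have hm : (1 : Int) ≤ (m : Int) := by
          have : m ≠ 0 := h
          omega
        simp only [pvTri]
        omega

-- A's inner loop over a sub-range [a, a+t) with a+t ≤ i appends everything
theorem pvInnerAll (i : Int) : ∀ (t : Nat) (a : Int), a + t ≤ i → ∀ (l : List Int) (c : Int),
    (PySem.List.pyRange a (a + t) 1).foldl
      (fun (st2 : List Int × Int) j =>
        let c := st2.2 + 1
        if j ≠ i then (st2.1 ++ [c], c) else (st2.1, c)) (l, c)
    = (l ++ PySem.List.pyRange (c + 1) (c + t + 1) 1, c + t) := by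
  intro t
  induction t with
  | zero =>
    intro a _ l c
    rw [PySem.List.pyRange_one_eq_nil (by omega), PySem.List.pyRange_one_eq_nil (by omega)]
    simp
  | succ t ih =>
    intro a h l c
    push_cast
    push_cast at h
    rw [PySem.List.pyRange_one_cons (by omega)]
    simp only [List.foldl_cons]
    have hne : a ≠ i := by omega
    simp only [hne, if_pos, ne_eq, not_false_eq_true]
    have h2 : a + 1 + (t : Int) ≤ i := by omega
    have heq : a + ((t : Int) + 1) = a + 1 + t := by ring
    rw [heq, ih (a + 1) h2 (l ++ [c + 1]) (c + 1)]
    rw [show c + ((t : Int) + 1) + 1 = c + 1 + t + 1 by ring,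
        show c + ((t : Int) + 1) = c + 1 + t by ring]
    rw [PySem.List.pyRange_one_cons (a := c + 1) (b := c + 1 + t + 1) (by omega)]
    rw [show c + 1 + 1 = c + 2 by ring]
    simp [List.append_assoc]

-- A's full inner loop for row i
theorem pvRowA (i : Nat) (l : List Int) (c : Int) :
    (PySem.List.pyRange 1 ((i : Int) + 1) 1).foldl
      (fun (st2 : List Int × Int) j =>
        let c := st2.2 + 1
        if j ≠ (i : Int) then (st2.1 ++ [c], c) else (st2.1, c)) (l, c)
    = (l ++ PySem.List.pyRange (c + 1) (c + i) 1, c + i) := by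
  cases i with
  | zero =>
    rw [PySem.List.pyRange_one_eq_nil (by omega), PySem.List.pyRange_one_eq_nil (by omega)]
    simp
  | succ s =>
    rw [show ((s + 1 : Nat) : Int) = (s : Int) + 1 from by push_cast; ring]
    rw [PySem.List.pyRange_one_succ_right (a := 1) (b := (s : Int) + 1) (by omega)]
    rw [List.foldl_append]
    have hall := pvInnerAll ((s : Int) + 1) s 1 (by omega) l c
    rw [show (1 : Int) + (s : Int) = (s : Int) + 1 by ring] at hall
    rw [hall]
    simp only [List.foldl_cons, List.foldl_nil, ne_eq, not_true_eq_false, if_false]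
    simp only [add_assoc]

-- A's outer loop state after m rows
theorem pvOuterA (m : Nat) :
    (PySem.List.pyRange 0 (m : Int) 1).foldl
      (fun (st : List Int × Int) i =>
        (PySem.List.pyRange 1 (i + 1) 1).foldl
          (fun (st2 : List Int × Int) j =>
            let c := st2.2 + 1
            if j ≠ i then (st2.1 ++ [c], c) else (st2.1, c)) st)
      (([] : List Int), (0 : Int))
    = (pvLA m, pvTri m) := by
  induction m with
  | zero => rw [PySem.List.pyRange_one_eq_nil (by omega)]; simp [pvLA, pvTri]
  | succ m ih =>
    rw [show ((m + 1 : Nat) : Int) = (m : Int) + 1 by push_cast; ring]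
    rw [PySem.List.pyRange_one_succ_right (by positivity)]
    rw [List.foldl_append, ih]
    simp only [List.foldl_cons, List.foldl_nil]
    rw [pvRowA m (pvLA m) (pvTri m)]
    simp [pvLA, pvTri]

-- B's outer loop state after m rows
theorem pvOuterB (m : Nat) :
    (PySem.List.pyRange 0 (m : Int) 1).foldl
      (fun (st : Int × PySem.Set Int) i =>
        let total := st.1 + i
        (total, if i > 0 then PySem.Set.add st.2 total else st.2))
      ((0 : Int), (PySem.Set.empty : PySem.Set Int))
    = (pvTri m, pvSB m) := by
  induction m with
  | zero => rw [PySem.List.pyRange_one_eq_nil (by omega)]; simp [pvTri, pvSB]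
  | succ m ih =>
    rw [show ((m + 1 : Nat) : Int) = (m : Int) + 1 by push_cast; ring]
    rw [PySem.List.pyRange_one_succ_right (by positivity)]
    rw [List.foldl_append, ih]
    simp only [List.foldl_cons, List.foldl_nil]
    cases m with
    | zero => simp [pvTri, pvSB]
    | succ s =>
      have hpos : (0 : Int) < ((s + 1 : Nat) : Int) := by positivity
      simp only [gt_iff_lt, hpos, if_true]
      have hnotmem : pvTri (s + 1) + ((s + 1 : Nat) : Int) ∉ pvSB (s + 1) := by
        intro hmem
        have := pvSB_le (s + 1) _ hmem
        push_cast at this; omega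
      have : PySem.Set.add (pvSB (s + 1)) (pvTri (s + 1) + ((s + 1 : Nat) : Int))
           = pvSB (s + 1) ++ [pvTri (s + 1) + ((s + 1 : Nat) : Int)] := by
        simp [PySem.Set.add, PySem.Set.contains]
        intro h
        exact absurd h hnotmem
      rw [this]
      have h1 : pvTri (s + 1) + ((s + 1 : Nat) : Int) = pvTri (s + 1 + 1) := by
        simp only [pvTri]
      have h2 : pvSB (s + 1 + 1) = pvSB (s + 1) ++ [pvTri (s + 1 + 1)] := by
        simp [pvSB]
      rw [h2, ← h1]

-- membership in pvSB decides as triangular check only at the top; key filter characterization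
theorem pvLA_eq_filter (m : Nat) :
    pvLA m = (PySem.List.pyRange 1 (pvTri m + 1) 1).filter
      (fun c => !(PySem.Set.contains (pvSB m) c)) := by
  induction m with
  | zero =>
    rw [PySem.List.pyRange_one_eq_nil (by simp [pvTri])]
    simp [pvLA]
  | succ m ih =>
    have htm := pvTri_nonneg m
    have hsplit : PySem.List.pyRange 1 (pvTri (m + 1) + 1) 1
        = PySem.List.pyRange 1 (pvTri m + 1) 1 ++ PySem.List.pyRange (pvTri m + 1) (pvTri (m + 1) + 1) 1 := by
      apply PySem.List.pyRange_one_append <;> simp [pvTri] <;> omega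
    rw [hsplit, List.filter_append]
    have hcontains : ∀ c : Int, 1 ≤ c → c ≤ pvTri m →
        (PySem.Set.contains (pvSB (m + 1)) c = PySem.Set.contains (pvSB m) c) := by
      intro c _ hc
      simp only [pvSB]
      split
      · rfl
      · rename_i hm0
        simp only [PySem.Set.contains, List.contains_append]
        have hm1 : (1 : Int) ≤ (m : Int) := by
          have h0 : m ≠ 0 := hm0
          omega
        have hfc : ((([pvTri (m + 1)] : List Int).contains c) = false) := by
          simp only [List.contains_cons, List.contains_nil, Bool.or_false, pvTri]
          exact beq_eq_false_iff_ne.mpr (by omega)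
        rw [hfc, Bool.or_false]
    have hfirst : (PySem.List.pyRange 1 (pvTri m + 1) 1).filter
        (fun c => !(PySem.Set.contains (pvSB (m + 1)) c)) = pvLA m := by
      rw [ih]
      apply List.filter_congr
      intro c hc
      rw [PySem.List.mem_pyRange_one] at hc
      rw [hcontains c hc.1 (by omega)]
    rw [hfirst]
    have hsecond : (PySem.List.pyRange (pvTri m + 1) (pvTri (m + 1) + 1) 1).filter
        (fun c => !(PySem.Set.contains (pvSB (m + 1)) c))
        = PySem.List.pyRange (pvTri m + 1) (pvTri m + m) 1 := by
      cases m with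
      | zero =>
        rw [PySem.List.pyRange_one_eq_nil (a := pvTri 0 + 1) (by simp [pvTri]),
            PySem.List.pyRange_one_eq_nil (by simp [pvTri])]
        simp
      | succ s =>
        have h1 : pvTri (s + 1) + 1 ≤ pvTri (s + 1) + (s + 1 : Nat) := by push_cast; omega
        have hT : pvTri (s + 1 + 1) = pvTri (s + 1) + (s + 1 : Nat) := by simp [pvTri]
        rw [hT]
        rw [PySem.List.pyRange_one_succ_right (b := pvTri (s + 1) + (s + 1 : Nat)) (by omega)]
        rw [List.filter_append]
        have hkeep : (PySem.List.pyRange (pvTri (s + 1) + 1) (pvTri (s + 1) + (s + 1 : Nat)) 1).filter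
            (fun c => !(PySem.Set.contains (pvSB (s + 1 + 1)) c))
            = PySem.List.pyRange (pvTri (s + 1) + 1) (pvTri (s + 1) + (s + 1 : Nat)) 1 := by
          apply List.filter_eq_self.mpr
          intro c hc
          rw [PySem.List.mem_pyRange_one] at hc
          simp only [PySem.Set.contains, Bool.not_eq_eq_eq_not, Bool.not_true]
          rw [List.contains_eq_mem, decide_eq_false_iff_not]
          intro hmem
          have hSB : pvSB (s + 1 + 1) = pvSB (s + 1) ++ [pvTri (s + 1 + 1)] := by
            simp [pvSB]
          rw [hSB] at hmem
          rcases List.mem_append.mp hmem with h' | h'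
          · have := pvSB_le (s + 1) c h'
            omega
          · simp only [List.mem_singleton] at h'
            rw [hT] at h'
            omega
        have hdrop : (([pvTri (s + 1) + (s + 1 : Nat)] : List Int)).filter
            (fun c => !(PySem.Set.contains (pvSB (s + 1 + 1)) c)) = [] := by
          have hmem : pvTri (s + 1) + ((s + 1 : Nat) : Int) ∈ pvSB (s + 1 + 1) := by
            simp [pvSB, hT]
          push_cast at hmem
          simp [PySem.Set.contains, List.contains_eq_mem, hmem]
        rw [hkeep, hdrop, List.append_nil]
    rw [hsecond]
    simp [pvLA]

theorem pv_main (k : Int) : get_child_index k = get_child_index_alt k := by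
  unfold get_child_index get_child_index_alt
  rcases le_or_gt (k + 1) 0 with h | h
  · rw [PySem.List.pyRange_one_eq_nil h]
    simp
  · have hk : 0 ≤ k := by omega
    obtain ⟨n, rfl⟩ : ∃ n : Nat, k = (n : Int) := ⟨k.toNat, (Int.toNat_of_nonneg hk).symm⟩
    have hcast : (n : Int) + 1 = ((n + 1 : Nat) : Int) := by push_cast; ring
    rw [hcast, pvOuterA (n + 1), pvOuterB (n + 1)]
    simpa using pvLA_eq_filter (n + 1)

-- ===== VERDICT (by name: the statement is the Claim_ definition above) =====
theorem get_child_index_spec : Claim_equal_get_child_index := by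
  intro k _
  unfold Spec_get_child_index
  exact pv_main k
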